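-- pv_equiv track=rewrite | github.com/boorooksus/Algorithm-Book | 백준/CH17-String/G2-20210-File_Explore2.py | str2li
-- ===== SOURCE A (Python) =====
-- from typing import List
--
-- def str2li(word: str) -> List[str]:
--     li = []
--     num = ""
--     for char in word:
--         if char.isdigit():
--             num += char
--             continue
--         elif num:
--             li.append(num)
--             num = ""
--         li.append(char)
--     if num:
--         li.append(num)
--     return li
-- ===== SOURCE B (Python) =====
-- def str2li(word):
--     li = []
--     i = 0
--     n = len(word)
--     while i < n:
--         if word[i].isdigit():
--             j = i + 1
--             while j < n and word[j].isdigit():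
--                 j += 1
--             li.append(word[i:j])
--             i = j
--         else:
--             li.append(word[i])
--             i += 1
--     return li
-- ===== Notes on version B (the rewrite author's own statement) =====
-- stated objective: alternative
-- what changed: Replaces A's char-by-char accumulator state machine (with post-loop flush) by an index scan that finds each maximal digit run with an inner while and slices it out in one piece.
import Mathlib
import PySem

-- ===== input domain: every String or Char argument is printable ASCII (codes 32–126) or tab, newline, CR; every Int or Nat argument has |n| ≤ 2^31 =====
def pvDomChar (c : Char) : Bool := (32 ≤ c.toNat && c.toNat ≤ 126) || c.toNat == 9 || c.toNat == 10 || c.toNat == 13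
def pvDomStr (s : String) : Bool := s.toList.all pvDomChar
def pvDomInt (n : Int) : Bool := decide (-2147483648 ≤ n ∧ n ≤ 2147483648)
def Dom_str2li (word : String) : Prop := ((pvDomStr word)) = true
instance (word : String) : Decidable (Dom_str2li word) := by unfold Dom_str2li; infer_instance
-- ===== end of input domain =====

-- B: index scan slicing out maximal digit runs instead of A's char accumulator; same return value.
-- ===== PORT A =====
-- A: fold over the chars with state (li, num); num kept as List Char, materialised with String.ofList at append time.
def str2liLoop : List Char → List String → List Char → List String
  | [], li, num => if num ≠ [] then li ++ [String.ofList num] else li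
  | c :: cs, li, num =>
      if PySem.Chars.isdigit c then
        str2liLoop cs li (num ++ [c])
      else
        str2liLoop cs ((if num ≠ [] then li ++ [String.ofList num] else li) ++ [String.ofList [c]]) []

def str2li (word : String) : List String := str2liLoop word.toList [] []

-- ===== PORT B =====
-- B's outer while: at a digit, the inner while computing j is takeWhile/dropWhile of the digit run
-- after the current char; word[i:j] is the run, and i jumps to j (the dropWhile remainder).
def str2liAltGo : List Char → List String
  | [] => []
  | c :: cs =>
      if PySem.Chars.isdigit c then
        String.ofList (c :: cs.takeWhile PySem.Chars.isdigit)
          :: str2liAltGo (cs.dropWhile PySem.Chars.isdigit)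
      else
        String.ofList [c] :: str2liAltGo cs
termination_by cs => cs.length
decreasing_by
  · exact Nat.lt_succ_of_le (List.length_dropWhile_le _ _)
  · simp

def str2li_alt (word : String) : List String := str2liAltGo word.toList

-- ===== PRECONDITION & SPEC =====
def Spec_str2li (word : String) (out : List String) : Prop := out = str2li_alt word
instance (word : String) (out : List String) : Decidable (Spec_str2li word out) := by unfold Spec_str2li; infer_instance

-- ===== CLAIM (what is proved, stated in full; the proofs are below) =====
def Claim_equal_str2li : Prop := ∀ (word : String), Dom_str2li word → Spec_str2li word (str2li word)

-- ===== LEMMAS AND PROOFS =====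

-- accumulator lemma: the output list prefix factors out
theorem str2liLoop_acc (cs : List Char) (li : List String) (num : List Char) :
    str2liLoop cs li num = li ++ str2liLoop cs [] num := by
  induction cs generalizing li num with
  | nil => simp only [str2liLoop]; split <;> simp
  | cons c cs ih =>
      simp only [str2liLoop]
      split
      · exact ih li (num ++ [c])
      · rw [ih]; conv_rhs => rw [ih]
        split <;> simp

-- a nonempty pending digit run flushes as the maximal digit run, then the loop restarts fresh
theorem str2liLoop_run (cs : List Char) (num : List Char) (h : num ≠ []) :
    str2liLoop cs [] num =
      String.ofList (num ++ cs.takeWhile PySem.Chars.isdigit)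
        :: str2liLoop (cs.dropWhile PySem.Chars.isdigit) [] [] := by
  induction cs generalizing num with
  | nil => simp [str2liLoop, h]
  | cons c cs ih =>
      by_cases hd : PySem.Chars.isdigit c
      · simp only [str2liLoop, List.takeWhile, List.dropWhile, hd]
        rw [ih (num ++ [c]) (by simp)]; simp
      · simp only [str2liLoop, List.takeWhile, List.dropWhile, hd, if_pos h, Bool.false_eq_true,
          if_false, ne_eq, not_true_eq_false, List.nil_append, List.append_nil]
        rw [str2liLoop_acc, str2liLoop_acc cs [String.ofList [c]]]
        simp

theorem str2liLoop_go (cs : List Char) : str2liLoop cs [] [] = str2liAltGo cs := by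
  induction cs using str2liAltGo.induct with
  | case1 => simp [str2liLoop, str2liAltGo]
  | case2 c cs hd ih =>
      simp only [str2liAltGo, if_pos hd, str2liLoop, List.nil_append]
      rw [str2liLoop_run cs [c] (by simp), ih]
      simp
  | case3 c cs hd ih =>
      simp only [str2liAltGo, if_neg hd, str2liLoop, List.nil_append]
      rw [str2liLoop_acc]
      simp [ih]

-- ===== VERDICT =====
theorem str2li_spec : Claim_equal_str2li := by
  intro word _
  unfold Spec_str2li str2li str2li_alt
  exact str2liLoop_go word.toList
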